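-- pv_equiv track=rewrite | github.com/DRMF/DRMF-Seeding-Project | main_page/src/mod_main.py | remove_brackets_text
-- ===== SOURCE A (Python) =====
-- def remove_brackets_text(string):
--     left_brackets = 0
--     text = ""
--
--     for ch in string:
--         if ch == "[":
--             left_brackets += 1
--         elif ch == "]":
--             left_brackets -= 1
--         elif not left_brackets:
--             text += ch
--
--     return text
-- ===== SOURCE B (Python) =====
-- def remove_brackets_text(string):
--     # Pass 1: prefix-depth table; prefix[i] is the bracket balance of string[:i].
--     deltas = [1 if c == "[" else -1 if c == "]" else 0 for c in string]
--     prefix = [0]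
--     for d in deltas:
--         prefix.append(prefix[-1] + d)
--     # Pass 2: keep each non-bracket char whose preceding balance is exactly 0.
--     return "".join(c for i, c in enumerate(string)
--                    if prefix[i] == 0 and c not in "[]")
-- ===== Notes on version B (the rewrite author's own statement) =====
-- stated objective: alternative
-- what changed: Replaces the single stateful filter loop by a two-pass computation: first an explicit prefix-depth table of bracket balances, then a selection of the characters whose preceding balance is exactly zero.
import Mathlib
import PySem

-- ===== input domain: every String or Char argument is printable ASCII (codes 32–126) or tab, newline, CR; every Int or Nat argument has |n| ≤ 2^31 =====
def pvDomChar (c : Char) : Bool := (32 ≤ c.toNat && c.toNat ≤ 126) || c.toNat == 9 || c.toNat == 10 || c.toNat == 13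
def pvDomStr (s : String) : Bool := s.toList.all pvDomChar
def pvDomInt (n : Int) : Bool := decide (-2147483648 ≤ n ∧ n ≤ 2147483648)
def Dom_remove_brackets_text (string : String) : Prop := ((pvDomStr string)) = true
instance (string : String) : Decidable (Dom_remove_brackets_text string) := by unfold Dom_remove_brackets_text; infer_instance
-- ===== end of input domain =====

-- B replaces A's single stateful filter loop by a two-pass computation (explicit
-- prefix-depth table, then selection); objective: alternative decomposition.

-- ===== PORT A =====
def remove_brackets_text (string : String) : String :=
  let r := string.toList.foldl
    (fun (st : Int × List Char) ch =>
      if ch = '[' then (st.1 + 1, st.2)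
      else if ch = ']' then (st.1 - 1, st.2)
      else if st.1 = 0 then (st.1, st.2 ++ [ch])
      else st)
    (0, [])
  String.mk r.2

-- ===== PORT B =====
-- delta of one char (the list comprehension's expression)
def pvDelta (c : Char) : Int := if c = '[' then 1 else if c = ']' then -1 else 0

-- the prefix-append loop of Source B: given the current last prefix value and the
-- remaining deltas, the prefix values appended from here on
def pvScan : Int → List Int → List Int
  | _, [] => []
  | s, d :: ds => (s + d) :: pvScan (s + d) ds

def remove_brackets_text_alt (string : String) : String :=
  let cs := string.toList
  let deltas := cs.map pvDelta
  let pre : List Int := 0 :: pvScan 0 deltas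
  String.mk (((cs.zip pre).filter
    (fun p => p.2 == 0 && p.1 != '[' && p.1 != ']')).map Prod.fst)

-- ===== PRECONDITION & SPEC =====
def Spec_remove_brackets_text (string : String) (out : String) : Prop := out = remove_brackets_text_alt string
instance (string : String) (out : String) : Decidable (Spec_remove_brackets_text string out) := by unfold Spec_remove_brackets_text; infer_instance

-- ===== CLAIM (what is proved, stated in full; the proofs are below) =====
def Claim_equal_remove_brackets_text : Prop := ∀ (string : String), Dom_remove_brackets_text string → Spec_remove_brackets_text string (remove_brackets_text string)

-- ===== LEMMAS AND PROOFS =====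

theorem pv_main (cs : List Char) (b : Int) (acc : List Char) :
    (cs.foldl
      (fun (st : Int × List Char) ch =>
        if ch = '[' then (st.1 + 1, st.2)
        else if ch = ']' then (st.1 - 1, st.2)
        else if st.1 = 0 then (st.1, st.2 ++ [ch])
        else st)
      (b, acc)).2
    = acc ++ ((cs.zip (b :: pvScan b (cs.map pvDelta))).filter
        (fun p => p.2 == 0 && p.1 != '[' && p.1 != ']')).map Prod.fst := by
  induction cs generalizing b acc with
  | nil => simp
  | cons c cs ih =>
    by_cases h1 : c = '['
    · subst h1
      simp [List.foldl, pvScan, pvDelta, ih]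
    · by_cases h2 : c = ']'
      · subst h2
        simp only [List.foldl_cons, if_neg h1]
        rw [ih]
        simp [pvScan, pvDelta, h1, sub_eq_add_neg]
      · by_cases h3 : b = 0
        · subst h3
          simp [List.foldl, pvScan, pvDelta, h1, h2, ih]
        · simp [List.foldl, pvScan, pvDelta, h1, h2, h3, ih]

-- ===== VERDICT (by name: the statement is the Claim_ definition above) =====
theorem remove_brackets_text_spec : Claim_equal_remove_brackets_text := by
  intro s _
  unfold Spec_remove_brackets_text remove_brackets_text remove_brackets_text_alt
  simp [pv_main]
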